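-- pv_equiv track=rewrite | github.com/driedl/food-graph | etl/evidence/lib/part_filter.py | _check_parent_applicability
-- ===== SOURCE A (Python) =====
-- from typing import Dict, Any, List, Set, Optional
--
-- def _check_parent_applicability(taxon_id: str, applies_to: List[str]) -> List[str]:
--     """Check if any parent taxon is in the applies_to list"""
--     matches = []
--     segments = taxon_id.split(':')
--
--     # Check progressively shorter taxon IDs (parent, grandparent, etc.)
--     for i in range(len(segments) - 1, 1, -1):  # Don't go below kingdom level
--         parent_id = ':'.join(segments[:i])
--         if parent_id in applies_to:
--             matches.append(parent_id)
--
--     return matches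
-- ===== SOURCE B (Python) =====
-- from typing import List
--
-- def _check_parent_applicability(taxon_id: str, applies_to: List[str]) -> List[str]:
--     """Check if any parent taxon is in the applies_to list.
--
--     Peels the last ':'-segment off the current ID instead of re-slicing and
--     re-joining the segment list on every iteration; stops at the 2-segment
--     (kingdom) level, i.e. while the peeled ID still contains a ':'.
--     """
--     matches = []
--     current = taxon_id.rsplit(':', 1)[0]
--     while ':' in current:
--         if current in applies_to:
--             matches.append(current)
--         current = current.rsplit(':', 1)[0]
--     return matches
-- ===== Notes on version B (the rewrite author's own statement) =====
-- stated objective: alternative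
-- what changed: Instead of splitting the ID into segments once and re-slicing/re-joining a prefix of the segment list on every loop iteration, B keeps a single shrinking string and peels the last ':'-segment off it with rsplit, emitting it when it is in applies_to and stopping as soon as no ':' is left (the 2-segment root).
import Mathlib
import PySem

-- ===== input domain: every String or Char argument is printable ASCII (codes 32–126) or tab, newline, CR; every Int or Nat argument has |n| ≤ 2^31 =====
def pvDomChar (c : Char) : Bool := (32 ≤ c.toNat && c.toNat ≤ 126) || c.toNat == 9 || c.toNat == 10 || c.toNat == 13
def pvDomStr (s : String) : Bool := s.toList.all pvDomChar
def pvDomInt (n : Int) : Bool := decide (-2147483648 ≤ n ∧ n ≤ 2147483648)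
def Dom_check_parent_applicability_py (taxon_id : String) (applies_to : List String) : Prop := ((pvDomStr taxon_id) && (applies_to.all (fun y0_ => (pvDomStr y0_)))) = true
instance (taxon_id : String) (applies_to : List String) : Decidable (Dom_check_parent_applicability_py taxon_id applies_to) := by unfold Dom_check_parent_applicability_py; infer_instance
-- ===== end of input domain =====

-- B peels the last ':'-segment off one shrinking string (rsplit) instead of re-slicing
-- and re-joining a prefix of the split segment list each iteration; same return value.

-- ===== PORT A =====
-- taxon_id.split(':'): the separator ":" is non-empty, so Python's split is exactly
-- PySem.Chars.splitOn on the code points; ':'.join(...) is PySem.Chars.join [':'].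
def check_parent_applicability_py (taxon_id : String) (applies_to : List String) : List String :=
  let segments := PySem.Chars.splitOn taxon_id.toList [':']
  (PySem.List.pyRange ((segments.length : Int) - 1) 1 (-1)).foldl
    (fun ms i =>
      let parent_id := String.ofList (PySem.Chars.join [':'] (PySem.List.slice segments none (some i)))
      if parent_id ∈ applies_to then ms ++ [parent_id] else ms)
    []

-- ===== PORT B =====
-- s.rsplit(':', 1)[0]: everything before the LAST ':' (s itself when s has no ':') — hand-ported, exact.
def rsplitHeadColon (cs : List Char) : List Char :=
  if ':' ∈ cs then ((cs.reverse.dropWhile (· ≠ ':')).drop 1).reverse else cs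

-- termination measure for B's while loop (cited by altGo's decreasing_by)
theorem rsplitHeadColon_length_lt (cs : List Char) (h : ':' ∈ cs) :
    (rsplitHeadColon cs).length < cs.length := by
  have h1 : ':' ∈ cs.reverse := by simpa using h
  have hne : cs.reverse.dropWhile (· ≠ ':') ≠ [] := by
    intro hnil
    have := List.dropWhile_eq_nil_iff.mp hnil ':' h1
    simp at this
  have hle : (cs.reverse.dropWhile (· ≠ ':')).length ≤ cs.length := by
    simpa using List.length_dropWhile_le (· ≠ ':') cs.reverse
  have hpos : 0 < (cs.reverse.dropWhile (· ≠ ':')).length := List.length_pos_iff.mpr hne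
  simp only [rsplitHeadColon, if_pos h, List.length_reverse, List.length_drop]
  omega

-- B's while loop: test 'current in applies_to', then peel, while ':' in current
def altGo (applies_to : List String) (current : List Char) : List String :=
  if h : ':' ∈ current then
    (if String.ofList current ∈ applies_to then [String.ofList current] else []) ++
      altGo applies_to (rsplitHeadColon current)
  else []
termination_by current.length
decreasing_by exact rsplitHeadColon_length_lt current h

def check_parent_applicability_py_alt (taxon_id : String) (applies_to : List String) : List String :=
  altGo applies_to (rsplitHeadColon taxon_id.toList)

-- ===== PRECONDITION & SPEC =====
def Spec_check_parent_applicability_py (taxon_id : String) (applies_to : List String) (out : List String) : Prop := out = check_parent_applicability_py_alt taxon_id applies_to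
instance (taxon_id : String) (applies_to : List String) (out : List String) : Decidable (Spec_check_parent_applicability_py taxon_id applies_to out) := by unfold Spec_check_parent_applicability_py; infer_instance

-- ===== CLAIM (what is proved, stated in full; the proofs are below) =====
def Claim_equal_check_parent_applicability_py : Prop := ∀ (taxon_id : String) (applies_to : List String), Dom_check_parent_applicability_py taxon_id applies_to → Spec_check_parent_applicability_py taxon_id applies_to (check_parent_applicability_py taxon_id applies_to)

-- ===== LEMMAS AND PROOFS =====

-- structural characterisation of splitting on a single ':'
def colonSplit : List Char → List (List Char)
  | [] => [[]]
  | c :: rest =>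
    if c = ':' then [] :: colonSplit rest
    else match colonSplit rest with
      | [] => [[c]]
      | p :: ps => (c :: p) :: ps

theorem colonSplit_ne_nil (l : List Char) : colonSplit l ≠ [] := by
  cases l with
  | nil => simp [colonSplit]
  | cons c rest =>
    simp only [colonSplit]
    split_ifs
    · simp
    · cases h : colonSplit rest <;> simp

-- helper: prepend a prefix onto the first piece
def consPre (pre : List Char) : List (List Char) → List (List Char)
  | [] => [pre]
  | p :: ps => (pre ++ p) :: ps

theorem splitOn_go_eq (fuel : Nat) (l cur : List Char) (acc : List (List Char))
    (hf : l.length < fuel) :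
    PySem.Chars.splitOn.go [':'] fuel l cur acc
      = acc.reverse ++ consPre cur.reverse (colonSplit l) := by
  induction fuel generalizing l cur acc with
  | zero => omega
  | succ fuel ih =>
    cases l with
    | nil => simp [PySem.Chars.splitOn.go, colonSplit, consPre]
    | cons c rest =>
      by_cases hc : c = ':'
      · subst hc
        have hpre : [':'].isPrefixOf (':' :: rest) = true := by simp [List.isPrefixOf]
        rw [show PySem.Chars.splitOn.go [':'] (fuel+1) (':' :: rest) cur acc
              = PySem.Chars.splitOn.go [':'] fuel (List.drop [':'].length (':' :: rest)) []
                  (cur.reverse :: acc) by simp [PySem.Chars.splitOn.go, hpre]]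
        simp only [List.length_cons, List.length_nil, Nat.zero_add, List.drop_succ_cons,
          List.drop_zero]
        rw [ih rest [] (cur.reverse :: acc) (by simpa using Nat.lt_of_succ_lt_succ hf)]
        have hcs := colonSplit_ne_nil rest
        cases hrest : colonSplit rest with
        | nil => exact absurd hrest hcs
        | cons p ps =>
          simp [colonSplit, consPre, hrest]
      · have hpre : [':'].isPrefixOf (c :: rest) = false := by
          simp [List.isPrefixOf]; exact fun h => absurd h.symm hc
        rw [show PySem.Chars.splitOn.go [':'] (fuel+1) (c :: rest) cur acc
              = PySem.Chars.splitOn.go [':'] fuel rest (c :: cur) acc by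
            simp [PySem.Chars.splitOn.go, hpre]]
        rw [ih rest (c :: cur) acc (by simpa using Nat.lt_of_succ_lt_succ hf)]
        have hcs := colonSplit_ne_nil rest
        cases hrest : colonSplit rest with
        | nil => exact absurd hrest hcs
        | cons p ps =>
          simp [colonSplit, consPre, hrest, hc]

theorem splitOn_eq_colonSplit (l : List Char) :
    PySem.Chars.splitOn l [':'] = colonSplit l := by
  show PySem.Chars.splitOn.go [':'] (l.length + 1) l [] [] = colonSplit l
  rw [splitOn_go_eq (l.length + 1) l [] [] (Nat.lt_succ_self _)]
  have hcs := colonSplit_ne_nil l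
  cases h : colonSplit l with
  | nil => exact absurd h hcs
  | cons p ps => simp [consPre]

theorem colonSplit_no_colon (l : List Char) : ∀ p ∈ colonSplit l, ':' ∉ p := by
  induction l with
  | nil => simp [colonSplit]
  | cons c rest ih =>
    intro p hp
    simp only [colonSplit] at hp
    split_ifs at hp with hc
    · rcases List.mem_cons.mp hp with h | h
      · simp [h]
      · exact ih p h
    · cases hrest : colonSplit rest with
      | nil => exact absurd hrest (colonSplit_ne_nil rest)
      | cons q qs =>
        rw [hrest] at hp
        rcases List.mem_cons.mp hp with h | h
        · subst h
          intro hmem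
          rcases List.mem_cons.mp hmem with h2 | h2
          · exact hc h2.symm
          · exact ih q (by rw [hrest]; exact List.mem_cons_self ..) h2
        · exact ih p (by rw [hrest]; exact List.mem_cons_of_mem _ h)

theorem join_colonSplit (l : List Char) :
    PySem.Chars.join [':'] (colonSplit l) = l := by
  induction l with
  | nil => simp [colonSplit, PySem.Chars.join_singleton]
  | cons c rest ih =>
    simp only [colonSplit]
    split_ifs with hc
    · subst hc
      cases hrest : colonSplit rest with
      | nil => exact absurd hrest (colonSplit_ne_nil rest)
      | cons q qs =>
        rw [PySem.Chars.join_cons_cons]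
        rw [hrest] at ih
        simp [ih]
    · cases hrest : colonSplit rest with
      | nil => exact absurd hrest (colonSplit_ne_nil rest)
      | cons q qs =>
        rw [hrest] at ih
        cases qs with
        | nil =>
          rw [PySem.Chars.join_singleton]
          rw [PySem.Chars.join_singleton] at ih
          simp [ih]
        | cons q2 qs2 =>
          rw [PySem.Chars.join_cons_cons]
          rw [PySem.Chars.join_cons_cons] at ih
          simp only [List.append_assoc, List.cons_append] at ih ⊢
          rw [ih]

-- a join of colon-free pieces contains ':' iff there are at least two pieces
theorem colon_mem_join_iff (l : List (List Char)) (hfree : ∀ p ∈ l, ':' ∉ p) :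
    ':' ∈ PySem.Chars.join [':'] l ↔ 2 ≤ l.length := by
  cases l with
  | nil => simp [PySem.Chars.join_nil]
  | cons p rest =>
    cases rest with
    | nil =>
      rw [PySem.Chars.join_singleton]
      simp only [List.length_cons, List.length_nil]
      constructor
      · intro h; exact absurd h (hfree p (by simp))
      · omega
    | cons q rest2 =>
      rw [PySem.Chars.join_cons_cons]
      simp only [List.length_cons]
      constructor
      · intro _; omega
      · intro _; simp

-- join of (l ++ [x]) with a non-empty l
theorem join_append_singleton (l : List (List Char)) (x : List Char) (hl : l ≠ []) :
    PySem.Chars.join [':'] (l ++ [x]) = PySem.Chars.join [':'] l ++ ':' :: x := by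
  induction l with
  | nil => exact absurd rfl hl
  | cons p rest ih =>
    cases rest with
    | nil =>
      simp only [List.nil_append, List.cons_append]
      rw [PySem.Chars.join_cons_cons, PySem.Chars.join_singleton, PySem.Chars.join_singleton]
      simp
    | cons q rest2 =>
      have := ih (by simp)
      simp only [List.cons_append] at this ⊢
      rw [PySem.Chars.join_cons_cons, PySem.Chars.join_cons_cons, this]
      simp

-- peeling the last segment off a join of colon-free pieces
theorem rsplitHeadColon_join (l : List (List Char)) (x : List Char)
    (hl : l ≠ []) (hfree : ∀ p ∈ l ++ [x], ':' ∉ p) :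
    rsplitHeadColon (PySem.Chars.join [':'] (l ++ [x])) = PySem.Chars.join [':'] l := by
  rw [join_append_singleton l x hl]
  have hmem : ':' ∈ PySem.Chars.join [':'] l ++ ':' :: x := by simp
  rw [rsplitHeadColon, if_pos hmem]
  have hxfree : ':' ∉ x := hfree x (by simp)
  have hdw : (x.reverse).dropWhile (· ≠ ':') = [] := by
    rw [List.dropWhile_eq_nil_iff]
    intro y hy
    simp only [List.mem_reverse] at hy
    simp only [decide_eq_true_eq]
    intro hcontra; subst hcontra; exact hxfree hy
  have hrev : (PySem.Chars.join [':'] l ++ ':' :: x).reverse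
      = x.reverse ++ ':' :: (PySem.Chars.join [':'] l).reverse := by
    simp
  rw [hrev, List.dropWhile_append, hdw]
  simp

-- the list of matched parents, for prefix lengths m, m-1, …, 2 (mirrors both loops)
def chain (applies_to : List String) (segs : List (List Char)) : Nat → List String
  | 0 => []
  | 1 => []
  | (m+2) =>
    (if String.ofList (PySem.Chars.join [':'] (segs.take (m+2))) ∈ applies_to
      then [String.ofList (PySem.Chars.join [':'] (segs.take (m+2)))] else [])
      ++ chain applies_to segs (m+1)

-- B's loop computes chain
theorem altGo_eq_chain (applies_to : List String) (segs : List (List Char))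
    (hfree : ∀ p ∈ segs, ':' ∉ p) :
    ∀ m, m ≤ segs.length →
      altGo applies_to (PySem.Chars.join [':'] (segs.take m)) = chain applies_to segs m := by
  intro m
  induction m with
  | zero =>
    intro _
    rw [altGo]
    simp [PySem.Chars.join_nil, chain]
  | succ m ih =>
    intro hm
    cases m with
    | zero =>
      rw [altGo]
      have hno : ':' ∉ PySem.Chars.join [':'] (segs.take 1) := by
        rw [colon_mem_join_iff _ (fun p hp => hfree p (List.mem_of_mem_take hp))]
        simp only [List.length_take]
        omega
      simp [hno, chain]
    | succ k =>
      -- m+1 = k+2 ≥ 2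
      have hklt : k + 1 < segs.length := by omega
      have htake : segs.take (k+2) = segs.take (k+1) ++ [segs[k+1]] := by
        rw [List.take_add_one]
        simp [List.getElem?_eq_getElem hklt]
      have hfree' : ∀ p ∈ segs.take (k+1) ++ [segs[k+1]], ':' ∉ p := by
        rw [← htake]; exact fun p hp => hfree p (List.mem_of_mem_take hp)
      have hlen1 : (segs.take (k+1)).length = k+1 := by
        simp [List.length_take]; omega
      have hne : segs.take (k+1) ≠ [] := by
        intro h; rw [h] at hlen1; simp at hlen1
      have hcolon : ':' ∈ PySem.Chars.join [':'] (segs.take (k+2)) := by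
        rw [colon_mem_join_iff _ (fun p hp => hfree p (List.mem_of_mem_take hp))]
        simp [List.length_take]; omega
      rw [altGo, dif_pos hcolon, htake, rsplitHeadColon_join _ _ hne hfree', ← htake,
        ih (by omega)]
      rfl

-- A's loop computes chain
theorem foldlA_eq_chain (applies_to : List String) (segs : List (List Char)) :
    ∀ m, m ≤ segs.length → ∀ acc : List String,
      (PySem.List.pyRange (m : Int) 1 (-1)).foldl
        (fun ms i =>
          if String.ofList (PySem.Chars.join [':'] (PySem.List.slice segs none (some i))) ∈ applies_to
            then ms ++ [String.ofList (PySem.Chars.join [':'] (PySem.List.slice segs none (some i)))]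
            else ms)
        acc = acc ++ chain applies_to segs m := by
  intro m
  induction m with
  | zero =>
    intro _ acc
    rw [PySem.List.pyRange_neg_one_eq_nil (by norm_num)]
    simp [chain]
  | succ m ih =>
    intro hm acc
    cases m with
    | zero =>
      rw [PySem.List.pyRange_neg_one_eq_nil (by norm_num)]
      simp [chain]
    | succ k =>
      have hcons : PySem.List.pyRange ((k+2 : Nat) : Int) 1 (-1)
          = ((k+2 : Nat) : Int) :: PySem.List.pyRange (((k+2 : Nat) : Int) - 1) 1 (-1) := by
        apply PySem.List.pyRange_neg_one_cons
        push_cast; omega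
      have hstep : (((k+2 : Nat) : Int) - 1) = ((k+1 : Nat) : Int) := by push_cast; ring
      rw [hcons, hstep, List.foldl_cons]
      rw [ih (by omega)]
      have hslice : PySem.List.slice segs none (some ((k+2 : Nat) : Int)) = segs.take (k+2) := by
        rw [PySem.List.slice_to segs (by positivity)]
        congr 1
      show _ = acc ++ chain applies_to segs (k+2)
      rw [chain]
      simp only [hslice]
      split_ifs with hmem
      · simp
      · simp

-- ===== VERDICT (by name: the statement is the Claim_ definition above) =====
theorem check_parent_applicability_py_spec : Claim_equal_check_parent_applicability_py := by
  intro taxon_id applies_to _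
  show check_parent_applicability_py taxon_id applies_to
      = check_parent_applicability_py_alt taxon_id applies_to
  simp only [check_parent_applicability_py, check_parent_applicability_py_alt,
    splitOn_eq_colonSplit]
  set cs := taxon_id.toList with hcs
  set segs := colonSplit cs with hsegs
  have hfree : ∀ p ∈ segs, ':' ∉ p := colonSplit_no_colon cs
  have hne : segs ≠ [] := colonSplit_ne_nil cs
  have hlenpos : 1 ≤ segs.length := List.length_pos_iff.mpr hne
  have hjoin : PySem.Chars.join [':'] segs = cs := join_colonSplit cs
  -- A's side
  have hA : ((segs.length : Int) - 1) = ((segs.length - 1 : Nat) : Int) := by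
    push_cast [hlenpos]; ring
  rw [hA, foldlA_eq_chain applies_to segs (segs.length - 1) (by omega) []]
  -- B's side
  rcases Nat.lt_or_ge segs.length 2 with h2 | h2
  · -- exactly one segment: cs is colon-free, nothing is peeled, nothing matches
    have hlen1 : segs.length = 1 := by omega
    have hcolon : ':' ∉ cs := by
      rw [← hjoin, colon_mem_join_iff segs hfree]
      omega
    rw [show rsplitHeadColon cs = cs from by rw [rsplitHeadColon, if_neg hcolon]]
    rw [altGo, dif_neg hcolon]
    simp [hlen1, chain]
  · -- at least two segments: the first peel lands on the (len-1)-segment prefix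
    have hklt : segs.length - 1 < segs.length := by omega
    have htake : segs = segs.take (segs.length - 1) ++ [segs[segs.length - 1]] := by
      conv_lhs => rw [← List.take_length (l := segs),
        show segs.length = (segs.length - 1) + 1 from by omega]
      rw [List.take_add_one]
      simp [List.getElem?_eq_getElem hklt]
    have hlen1 : (segs.take (segs.length - 1)).length = segs.length - 1 := by
      simp only [List.length_take]; omega
    have hneT : segs.take (segs.length - 1) ≠ [] := by
      intro h; rw [h] at hlen1; simp at hlen1; omega
    have hfree' : ∀ p ∈ segs.take (segs.length - 1) ++ [segs[segs.length - 1]], ':' ∉ p := by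
      rw [← htake]; exact hfree
    have hpeel : rsplitHeadColon cs = PySem.Chars.join [':'] (segs.take (segs.length - 1)) := by
      rw [← hjoin]
      conv_lhs => rw [htake]
      exact rsplitHeadColon_join _ _ hneT hfree'
    rw [hpeel, altGo_eq_chain applies_to segs hfree (segs.length - 1) (by omega)]
    simp
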